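-- pv_equiv track=rewrite | github.com/JonathanGOB/ML-datadrift | helpers.py | number_to_bitarray
-- ===== SOURCE A (Python) =====
-- def number_to_bitarray(array, modulo):
--     holder_x = []
--     temp_holder_x = ""
--     mod_x = 0
--     max = 0
--     for card in array:
--         bits = 0
--         if modulo:
--             bits = 1 | bits
--             if (mod_x % 2) == 1:
--                 max = 13
--             if (mod_x % 2) == 0:
--                 max = 4
--             mod_x += 1
--         if not modulo:
--             if card == 0:
--                 bits = 0
--             elif card > 0:
--                 bits = 1 | bits
--             max = 10
--
--         card = max - card
--         bits = bits << card
--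
--         bits = bin(bits)[2:].zfill(max)
--         temp_holder_x += bits
--
--     for bit in temp_holder_x:
--         holder_x.append(int(bit))
--
--     return holder_x
-- ===== SOURCE B (Python) =====
-- def number_to_bitarray(array, modulo):
--     out = []
--     for i, card in enumerate(array):
--         width = (4 if i % 2 == 0 else 13) if modulo else 10
--         if modulo or card > 0:
--             out += [0] * (card - 1) + [1] + [0] * (width - card)
--         else:
--             out += [0] * width
--     return out
-- ===== Notes on version B (the rewrite author's own statement) =====
-- stated objective: simpler
-- what changed: B builds each field directly as a one-hot list by list repetition and concatenation ((card-1) zeros, a one, (width-card) zeros; all zeros when the bit is unset), eliminating all bit arithmetic, the bin()/zfill string formatting, the intermediate string buffer and the second char-to-int expansion loop of A.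
import Mathlib
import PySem

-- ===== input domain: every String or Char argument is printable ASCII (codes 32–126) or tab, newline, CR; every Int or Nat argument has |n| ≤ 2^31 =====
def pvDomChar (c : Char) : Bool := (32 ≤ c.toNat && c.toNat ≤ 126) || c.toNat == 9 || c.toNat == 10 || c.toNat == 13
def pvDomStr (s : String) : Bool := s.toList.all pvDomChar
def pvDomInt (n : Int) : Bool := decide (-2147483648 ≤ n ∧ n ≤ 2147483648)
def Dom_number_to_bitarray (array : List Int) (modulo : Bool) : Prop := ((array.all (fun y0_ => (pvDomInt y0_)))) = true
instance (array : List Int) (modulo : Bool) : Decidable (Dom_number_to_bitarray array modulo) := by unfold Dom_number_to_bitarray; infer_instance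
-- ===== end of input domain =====

-- B builds each field directly as a one-hot list by list repetition and concatenation,
-- with no bit arithmetic, no bin()/zfill formatting, no string buffer and no second
-- expansion loop (objective: simpler).

-- ===== PORT A =====
-- int(ch) for a single digit character
def pvC2I (c : Char) : Int := (c.toNat : Int) - 48

-- bin(n)[2:] for n > 0 (MSB first); pvBin adds Python's bin(0)[2:] = "0"
def pvBinGo (n : Nat) : List Char :=
  if h : n = 0 then []
  else pvBinGo (n / 2) ++ [if n % 2 == 1 then '1' else '0']
decreasing_by exact Nat.div_lt_self (Nat.pos_of_ne_zero h) one_lt_two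

def pvBin (n : Nat) : List Char := if n = 0 then ['0'] else pvBinGo n

-- s.zfill(w) for a sign-free digit string
def pvZfill (w : Nat) (s : List Char) : List Char := List.replicate (w - s.length) '0' ++ s

-- A's first loop: builds temp_holder_x; state (temp, mod_x).
-- bits before the shift is 0 or 1, hence nonnegative: `.toNat` on it is exact.
-- The shift amount `maxv - card` is nonnegative inside Pre_ (Python raises ValueError otherwise).
def pvALoop (modulo : Bool) : List Int → List Char → Int → List Char
  | [], temp, _ => temp
  | card :: rest, temp, modx =>
    let bits : Int :=
      if modulo then 1  -- 1 | 0
      else if card = 0 then 0 else if 0 < card then 1 else 0  -- 1 | 0 in the positive branch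
    let maxv : Int := if modulo then (if modx % 2 = 1 then 13 else 4) else 10
    let bits : Int := bits <<< (maxv - card).toNat
    let s : List Char := pvZfill maxv.toNat (pvBin bits.toNat)
    pvALoop modulo rest (temp ++ s) (if modulo then modx + 1 else modx)

def number_to_bitarray (array : List Int) (modulo : Bool) : List Int :=
  -- second loop: for bit in temp_holder_x: holder_x.append(int(bit))
  (pvALoop modulo array [] 0).map pvC2I

-- ===== PORT B =====
-- Source B's loop over enumerate(array); `[0] * n` with a possibly negative n is
-- List.replicate n.toNat 0 (Python's negative repetition gives []; toNat clamps the same way).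
def pvBLoop (modulo : Bool) : List Int → Nat → List Int → List Int
  | [], _, out => out
  | card :: rest, i, out =>
    let width : Int := if modulo then (if i % 2 = 0 then 4 else 13) else 10
    let chunk : List Int :=
      if modulo || decide (0 < card) then
        List.replicate (card - 1).toNat 0 ++ [1] ++ List.replicate (width - card).toNat 0
      else
        List.replicate width.toNat 0
    pvBLoop modulo rest (i + 1) (out ++ chunk)

def number_to_bitarray_alt (array : List Int) (modulo : Bool) : List Int :=
  pvBLoop modulo array 0 []

-- ===== PRECONDITION & SPEC =====
-- Pre_ excludes exactly the inputs where A raises ValueError ("negative shift count"):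
-- some card exceeds the width used at its position (4/13 alternating when modulo, else 10).
def Pre_number_to_bitarray (array : List Int) (modulo : Bool) : Prop :=
  ∀ p ∈ array.zipIdx, p.1 ≤ (if modulo then (if p.2 % 2 = 0 then 4 else 13) else 10)
instance (array : List Int) (modulo : Bool) : Decidable (Pre_number_to_bitarray array modulo) := by
  unfold Pre_number_to_bitarray; infer_instance

def pvWitness_number_to_bitarray : List Int × Bool := ([1, 5, 0, -2], true)

def Spec_number_to_bitarray (array : List Int) (modulo : Bool) (out : List Int) : Prop := out = number_to_bitarray_alt array modulo
instance (array : List Int) (modulo : Bool) (out : List Int) : Decidable (Spec_number_to_bitarray array modulo out) := by unfold Spec_number_to_bitarray; infer_instance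

-- ===== CLAIM (what is proved, stated in full; the proofs are below) =====
def Claim_equal_number_to_bitarray : Prop := ∀ (array : List Int) (modulo : Bool), Dom_number_to_bitarray array modulo → Pre_number_to_bitarray array modulo → Spec_number_to_bitarray array modulo (number_to_bitarray array modulo)

-- ===== LEMMAS AND PROOFS =====

theorem pvBinGo_pow (k : Nat) : pvBinGo (2 ^ k) = '1' :: List.replicate k '0' := by
  induction k with
  | zero =>
      rw [pow_zero, pvBinGo, dif_neg one_ne_zero,
        show (1 : Nat) / 2 = 0 from rfl, pvBinGo, dif_pos rfl]
      rfl
  | succ k ih =>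
      rw [pvBinGo, dif_neg (by positivity),
        show 2 ^ (k + 1) / 2 = 2 ^ k from by rw [pow_succ]; simp,
        show 2 ^ (k + 1) % 2 = 0 from by rw [pow_succ]; simp [Nat.mul_mod_left], ih]
      rw [show (if ((0 : Nat) == 1) = true then '1' else '0') = '0' from rfl,
        List.replicate_succ', List.cons_append]

theorem map_c2i_replicate (n : Nat) : (List.replicate n '0').map pvC2I = List.replicate n 0 := by
  rw [List.map_replicate, show pvC2I '0' = 0 from by decide]

-- per-card, bit unset: A appends "0"*width; B appends width zeros
theorem per_zero (w s : Nat) (hw : 1 ≤ w) :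
    (pvZfill w (pvBin ((0 : Int) <<< s).toNat)).map pvC2I = List.replicate w 0 := by
  rw [show ((0 : Int) <<< s) = 0 from by rw [Int.shiftLeft_eq]; ring,
    show (0 : Int).toNat = 0 from rfl, show pvBin 0 = ['0'] from rfl]
  unfold pvZfill
  rw [List.map_append, map_c2i_replicate, List.map_cons, List.map_nil,
    show pvC2I '0' = 0 from by decide]
  obtain ⟨w', rfl⟩ : ∃ w', w = w' + 1 := ⟨w - 1, by omega⟩
  rw [List.length_cons, List.length_nil, List.replicate_succ']
  rfl

-- per-card, bit set: A appends bin(1 << (width-card)).zfill(width);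
-- B appends (card-1).toNat zeros, a one, (width-card).toNat zeros
theorem per_one (width card : Int) (hw : 1 ≤ width) (hc : card ≤ width) :
    (pvZfill width.toNat (pvBin ((1 : Int) <<< (width - card).toNat).toNat)).map pvC2I
      = List.replicate (card - 1).toNat 0 ++ [1] ++ List.replicate (width - card).toNat 0 := by
  set k : Nat := (width - card).toNat with hk
  have h1 : ((1 : Int) <<< k) = ((2 ^ k : Nat) : Int) := by
    rw [Int.shiftLeft_eq]; push_cast; ring
  rw [h1, Int.toNat_natCast,
    show pvBin (2 ^ k) = pvBinGo (2 ^ k) from by rw [pvBin, if_neg (by positivity)],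
    pvBinGo_pow]
  unfold pvZfill
  rw [List.map_append, map_c2i_replicate, List.map_cons, map_c2i_replicate,
    show pvC2I '1' = 1 from by decide, List.length_cons, List.length_replicate,
    show width.toNat - (k + 1) = (card - 1).toNat from by omega]
  simp

-- main loop correspondence
theorem loop_eq (modulo : Bool) (l : List Int) : ∀ (i : Nat) (modx : Int) (temp : List Char),
    (modulo = true → modx = (i : Int)) →
    (∀ p ∈ l.zipIdx i, p.1 ≤ (if modulo then (if p.2 % 2 = 0 then 4 else 13) else 10)) →
    (pvALoop modulo l temp modx).map pvC2I = pvBLoop modulo l i (temp.map pvC2I) := by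
  induction l with
  | nil => intro i modx temp _ _; simp [pvALoop, pvBLoop]
  | cons card rest ih =>
      intro i modx temp hmod hpre
      have hcard : card ≤ (if modulo then (if i % 2 = 0 then 4 else 13) else 10) := by
        have := hpre (card, i) (by simp [List.zipIdx_cons])
        simpa using this
      have hrest : ∀ p ∈ rest.zipIdx (i + 1), p.1 ≤ (if modulo then (if p.2 % 2 = 0 then 4 else 13) else 10) := by
        intro p hp
        exact hpre p (by simp [List.zipIdx_cons, hp])
      rw [pvALoop, pvBLoop]
      -- the widths of A ("max") and B ("width") agree
      have hw : (if modulo then (if modx % 2 = 1 then (13 : Int) else 4) else 10)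
              = (if modulo then (if i % 2 = 0 then (4 : Int) else 13) else 10) := by
        cases modulo with
        | false => rfl
        | true =>
            rw [hmod rfl]
            have hc : (i : Int) % 2 = ((i % 2 : Nat) : Int) := by omega
            have h2 : i % 2 = 0 ∨ i % 2 = 1 := by omega
            rcases h2 with h2 | h2 <;> simp [hc, h2]
      simp only [hw]
      set width : Int := (if modulo then (if i % 2 = 0 then (4 : Int) else 13) else 10) with hwidth
      have hw1 : 1 ≤ width := by
        cases modulo with
        | false => simp [hwidth]
        | true => by_cases h : i % 2 = 0 <;> simp [hwidth, h]
      have hkey :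
          (pvZfill width.toNat (pvBin (((if modulo then (1 : Int)
              else if card = 0 then 0 else if 0 < card then 1 else 0) <<< (width - card).toNat)).toNat)).map pvC2I
            = (if modulo || decide (0 < card) then
                 List.replicate (card - 1).toNat 0 ++ [1] ++ List.replicate (width - card).toNat 0
               else List.replicate width.toNat 0) := by
        cases modulo with
        | true =>
            rw [if_pos rfl, if_pos (by simp)]
            exact per_one width card hw1 hcard
        | false =>
            rw [if_neg (by simp)]
            by_cases hpos : 0 < card
            · rw [if_neg (by omega), if_pos hpos, if_pos (by simp [hpos])]
              exact per_one width card hw1 hcard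
            · have hz : (if card = 0 then (0 : Int) else if 0 < card then 1 else 0) = 0 := by
                by_cases h0 : card = 0 <;> simp [h0, hpos]
              rw [hz, if_neg (by simp [hpos])]
              exact per_zero width.toNat (width - card).toNat (by omega)
      rw [ih (i + 1) (if modulo then modx + 1 else modx) _
        (by intro h
            cases modulo with
            | false => simp at h
            | true => rw [if_pos rfl, hmod rfl]; push_cast; ring) hrest,
        List.map_append, hkey]

-- ===== VERDICT (by name: the statement is the Claim_ definition above) =====
theorem number_to_bitarray_spec : Claim_equal_number_to_bitarray := by
  intro array modulo _ hpre
  unfold Spec_number_to_bitarray number_to_bitarray number_to_bitarray_alt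
  exact loop_eq modulo array 0 0 [] (by intro _; rfl) hpre
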